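-- pv_equiv track=rewrite | github.com/danypclk/Segmentation-of-TPTP-Symbols | evaluation/eval_bert_2.py | segment_text
-- ===== SOURCE A (Python) =====
-- def segment_text(text, labels):
--     """
--     Segment text into words based on the labels, ensuring all words are in lowercase.
--
--     :param text: Input string
--     :param labels: List of labels corresponding to each character in the text
--     :return: List of segmented words in lowercase
--     """
--     words = []
--     current_word = []
--
--     for char, label in zip(text, labels):
--         if label == 1:  # Start of a new word
--             if current_word:
--                 words.append("".join(current_word).lower())
--             current_word = [char]
--         else:  # Continuation of the current word
--             current_word.append(char)
--
--     # Add the last word if any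
--     if current_word:
--         words.append("".join(current_word).lower())
--
--     return words
-- ===== SOURCE B (Python) =====
-- def segment_text(text, labels):
--     """Segment text into lowercase words by precomputing word boundaries and slicing."""
--     n = min(len(text), len(labels))
--     if n == 0:
--         return []
--     starts = [0] + [i for i in range(1, n) if labels[i] == 1]
--     ends = starts[1:] + [n]
--     return [text[s:e].lower() for s, e in zip(starts, ends)]
-- ===== Notes on version B (the rewrite author's own statement) =====
-- stated objective: alternative
-- what changed: B precomputes the list of word-start boundaries (index 0 plus every position with label 1), pairs them with end boundaries, and slices-and-lowercases the string per word, instead of A's per-character accumulation of a current word inside one fold.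
import Mathlib
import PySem

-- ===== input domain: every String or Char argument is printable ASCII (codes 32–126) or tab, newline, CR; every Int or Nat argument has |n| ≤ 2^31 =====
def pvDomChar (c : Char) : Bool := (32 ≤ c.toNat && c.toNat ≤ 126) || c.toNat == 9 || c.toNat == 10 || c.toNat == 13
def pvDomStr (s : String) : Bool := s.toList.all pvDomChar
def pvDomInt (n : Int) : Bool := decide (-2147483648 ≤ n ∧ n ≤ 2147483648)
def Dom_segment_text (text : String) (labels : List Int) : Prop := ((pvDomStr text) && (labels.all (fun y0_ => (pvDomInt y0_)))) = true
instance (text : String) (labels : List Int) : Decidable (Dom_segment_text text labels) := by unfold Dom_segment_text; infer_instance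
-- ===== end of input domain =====

-- B precomputes word-start boundaries and slices the string per word instead of A's
-- per-character accumulation of a current word; same return value on every input (A is total).

-- ===== PORT A =====
-- loop body of A's 'for char, label in zip(text, labels)'
def segStep (st : List String × List Char) (p : Char × Int) : List String × List Char :=
  if p.2 == 1 then
    (if st.2 ≠ [] then st.1 ++ [PySem.Str.lower (String.ofList st.2)] else st.1, [p.1])
  else
    (st.1, st.2 ++ [p.1])

-- trailing 'if current_word: words.append("".join(current_word).lower())'
-- ("".join over a list of single characters is String.ofList — exact)
def segFin (st : List String × List Char) : List String :=
  if st.2 ≠ [] then st.1 ++ [PySem.Str.lower (String.ofList st.2)] else st.1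

def segment_text (text : String) (labels : List Int) : List String :=
  segFin ((text.toList.zip labels).foldl segStep ([], []))

-- ===== PORT B =====
def segment_text_alt (text : String) (labels : List Int) : List String :=
  let n : Int := min (PySem.Str.len text) (labels.length : Int)
  if n = 0 then []
  else
    -- labels[i] is always in range here (1 ≤ i < n ≤ len(labels)), so pyGetD is exact
    let starts : List Int :=
      [0] ++ (PySem.List.pyRange 1 n 1).filter (fun i => PySem.List.pyGetD labels i 0 == 1)
    let ends : List Int := PySem.List.slice starts (some 1) none ++ [n]
    (starts.zip ends).map (fun se => PySem.Str.lower (PySem.Str.slice text (some se.1) (some se.2)))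

-- ===== PRECONDITION & SPEC =====
def Spec_segment_text (text : String) (labels : List Int) (out : List String) : Prop := out = segment_text_alt text labels
instance (text : String) (labels : List Int) (out : List String) : Decidable (Spec_segment_text text labels out) := by unfold Spec_segment_text; infer_instance

-- ===== CLAIM (what is proved, stated in full; the proofs are below) =====
def Claim_equal_segment_text : Prop := ∀ (text : String) (labels : List Int), Dom_segment_text text labels → Spec_segment_text text labels (segment_text text labels)

-- ===== LEMMAS AND PROOFS =====

-- lowercased word from a list of characters
def wordify (w : List Char) : String := PySem.Str.lower (String.ofList w)

-- 'this char does not start a new word'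
def notOne (q : Char × Int) : Bool := q.2 != 1

-- the common word-level recursion: first word = head char plus following non-1-labelled chars
def segWords : List (Char × Int) → List (List Char)
  | [] => []
  | p :: ps =>
    (p.1 :: (ps.takeWhile notOne).map Prod.fst) :: segWords (ps.dropWhile notOne)
termination_by l => l.length
decreasing_by
  simp only [List.length_cons]
  exact Nat.lt_succ_of_le (List.length_dropWhile_le _ _)

theorem segWords_nil : segWords [] = [] := by rw [segWords.eq_def]

theorem segWords_cons (p : Char × Int) (ps : List (Char × Int)) :
    segWords (p :: ps) = (p.1 :: (ps.takeWhile notOne).map Prod.fst) :: segWords (ps.dropWhile notOne) := by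
  rw [segWords.eq_def]

def sliceF (cs : List Char) (se : Nat × Nat) : List Char := (cs.drop se.1).take (se.2 - se.1)

-- boundary chopping at Nat level
def chop (cs : List Char) (bs : List Nat) (n : Nat) : List (List Char) :=
  ((0 :: bs).zip (bs ++ [n])).map (sliceF cs)

-- the interior word-start positions, at Nat level
def startsTail (ps : List (Char × Int)) (n : Nat) : List Nat :=
  (List.range' 1 (n - 1)).filter (fun i => (ps.getD i (' ', (0:Int))).2 == 1)

theorem takeWhile_eq_take {α : Type} (p : α → Bool) (l : List α) :
    l.takeWhile p = l.take (l.takeWhile p).length := by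
  induction l with
  | nil => simp
  | cons a l ih =>
    cases h : p a <;> simp [h]
    exact ih

theorem dropWhile_eq_drop {α : Type} (p : α → Bool) (l : List α) :
    l.dropWhile p = l.drop (l.takeWhile p).length := by
  induction l with
  | nil => simp
  | cons a l ih =>
    cases h : p a <;> simp [h, ih]

theorem head_dropWhile_false {α : Type} (p : α → Bool) :
    ∀ (l : List α) (q : α) (d' : List α), l.dropWhile p = q :: d' → p q = false := by
  intro l
  induction l with
  | nil => intro q d' h; simp at h
  | cons a l ih =>
    intro q d' h
    by_cases ha : p a
    · rw [List.dropWhile_cons_of_pos ha] at h; exact ih _ _ h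
    · rw [List.dropWhile_cons_of_neg ha] at h
      cases h; simpa using ha

theorem getD_drop' {α : Type} (l : List α) (k j : Nat) (d : α) :
    (l.drop k).getD j d = l.getD (k + j) d := by
  simp [List.getD_eq_getElem?_getD, List.getElem?_drop]

theorem range'_shift (k m : Nat) : List.range' (1 + k) m = (List.range' 1 m).map (· + k) := by
  rw [List.range'_eq_map_range, List.range'_eq_map_range, List.map_map]
  apply List.map_congr_left
  intro x _
  simp only [Function.comp_apply]
  omega

theorem map_fst_zip_eq_take {α β : Type} (cs : List α) (ls : List β) :
    (cs.zip ls).map Prod.fst = cs.take (cs.zip ls).length := by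
  induction cs generalizing ls with
  | nil => simp
  | cons c cs ih =>
    cases ls with
    | nil => simp
    | cons l ls => simp [List.zip_cons_cons, List.take_succ_cons, ih]

theorem snd_getD_zip (cs : List Char) (ls : List Int) (i : Nat) (h : i < (cs.zip ls).length) :
    ((cs.zip ls).getD i (' ', (0:Int))).2 = ls.getD i 0 := by
  have h2 : i < ls.length := by
    have := @List.length_zip _ _ cs ls; omega
  rw [List.getD_eq_getElem _ _ h, List.getElem_zip, List.getD_eq_getElem _ _ h2]

theorem lower_slice (text : String) (s e : Nat) :
    PySem.Str.lower (PySem.Str.slice text (some (s:Int)) (some (e:Int)))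
      = wordify ((text.toList.drop s).take (e - s)) := by
  rw [← String.toList_inj, wordify, PySem.Str.toList_lower, PySem.Str.toList_lower,
      PySem.Str.toList_slice, PySem.Chars.slice_eq_listSlice, PySem.List.slice_natCast,
      String.toList_ofList]

theorem slice_take (cs : List Char) (N s e : Nat) (he : e ≤ N) :
    ((cs.take N).drop s).take (e - s) = (cs.drop s).take (e - s) := by
  rw [List.drop_take, List.take_take]
  congr 1
  omega

-- the main B-side lemma: boundary chopping computes the word recursion
theorem chop_eq_segWords (N : Nat) : ∀ (ps : List (Char × Int)), ps.length = N → ps ≠ [] →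
    chop (ps.map Prod.fst) (startsTail ps ps.length) ps.length = segWords ps := by
  induction N using Nat.strong_induction_on with
  | _ N IH =>
  intro ps hN hne
  cases ps with
  | nil => exact absurd rfl hne
  | cons p tail =>
  have hN' : tail.length + 1 = N := by simpa using hN
  have hLle : (tail.takeWhile notOne).length ≤ tail.length := by
    calc (tail.takeWhile notOne).length
        = (tail.take (tail.takeWhile notOne).length).length := by rw [← takeWhile_eq_take]
      _ ≤ tail.length := by simp
  have hdget : ∀ (i : Nat), (p :: tail).getD (i+1) (' ', (0:Int)) = tail.getD i (' ', 0) := by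
    intro i; exact List.getD_cons_succ
  have hlowF : ∀ i ∈ List.range' 1 (tail.takeWhile notOne).length,
      ¬ ((((p :: tail).getD i (' ', (0:Int))).2 == 1) = true) := by
    intro i hi
    rw [List.mem_range'_1] at hi
    obtain ⟨j, rfl⟩ : ∃ j, i = j + 1 := ⟨i - 1, by omega⟩
    rw [hdget j]
    have hjt : j < (tail.takeWhile notOne).length := by omega
    have hjtail : j < tail.length := lt_of_lt_of_le hjt hLle
    have he : tail.getD j (' ', (0:Int)) = tail[j]'hjtail := by
      simp [List.getD_eq_getElem?_getD, List.getElem?_eq_getElem hjtail]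
    rw [he]
    have hget? : (tail.takeWhile notOne)[j]? = some (tail[j]'hjtail) := by
      rw [takeWhile_eq_take notOne tail, List.getElem?_take]
      simp [hjt, List.getElem?_eq_getElem hjtail]
    have hmem : tail[j]'hjtail ∈ tail.takeWhile notOne := List.mem_of_getElem? hget?
    have hno := List.mem_takeWhile_imp hmem
    simp only [notOne, bne_iff_ne, ne_eq] at hno
    simp [hno]
  have hdrop_eq : tail.dropWhile notOne = tail.drop (tail.takeWhile notOne).length :=
    dropWhile_eq_drop notOne tail
  by_cases hkn : (tail.takeWhile notOne).length = tail.length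
  · -- no further word start: the whole input is a single word
    have hstail : startsTail (p :: tail) ((p :: tail).length) = [] := by
      unfold startsTail
      apply List.filter_eq_nil_iff.mpr
      intro a ha
      apply hlowF
      simpa [hkn] using ha
    have hdnil : tail.dropWhile notOne = [] := by
      rw [hdrop_eq, hkn]
      simp
    have htall : tail.takeWhile notOne = tail := by
      conv_lhs => rw [takeWhile_eq_take notOne tail]
      rw [hkn, List.take_length]
    rw [hstail, segWords_cons, hdnil, segWords_nil, htall]
    unfold chop sliceF
    simp only [List.nil_append, List.zip_cons_cons, List.zip_nil_right, List.map_cons,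
      List.map_nil, List.drop_zero, Nat.sub_zero]
    rw [show (p :: tail).length = (p.1 :: List.map Prod.fst tail).length from by simp, List.take_length]
  · have hklt : (tail.takeWhile notOne).length < tail.length := lt_of_le_of_ne hLle hkn
    obtain ⟨q, d', hdq⟩ : ∃ q d', tail.dropWhile notOne = q :: d' := by
      cases hdq : tail.dropWhile notOne with
      | nil =>
        rw [hdrop_eq, List.drop_eq_nil_iff] at hdq
        omega
      | cons q d' => exact ⟨q, d', rfl⟩
    have hq1 : (q.2 == 1) = true := by
      have h := head_dropWhile_false notOne tail q d' hdq
      simp [notOne] at h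
      simpa using h
    have hqget : tail.getD (tail.takeWhile notOne).length (' ', (0:Int)) = q := by
      have hdr : tail.drop (tail.takeWhile notOne).length = q :: d' := by
        rw [← hdrop_eq, hdq]
      have h0 : (tail.drop (tail.takeWhile notOne).length).getD 0 (' ', (0:Int)) = q := by
        rw [hdr]; rfl
      rw [getD_drop'] at h0
      simpa using h0
    have hstep : (p :: tail).drop ((tail.takeWhile notOne).length + 1) = tail.dropWhile notOne := by
      rw [List.drop_succ_cons, hdrop_eq]
    have hlen' : ((p :: tail).drop ((tail.takeWhile notOne).length + 1)).length
        = tail.length - (tail.takeWhile notOne).length := by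
      simp only [List.length_drop, List.length_cons]
      omega
    have hne' : (p :: tail).drop ((tail.takeWhile notOne).length + 1) ≠ [] := by
      intro h
      rw [List.drop_eq_nil_iff] at h
      simp only [List.length_cons] at h
      omega
    have hfil : List.filter ((fun i => (((p :: tail).getD i (' ', (0:Int))).2 == 1)) ∘ (· + ((tail.takeWhile notOne).length + 1)))
          (List.range' 1 (tail.length - (tail.takeWhile notOne).length - 1))
        = List.filter (fun i => ((((p :: tail).drop ((tail.takeWhile notOne).length + 1)).getD i (' ', (0:Int))).2 == 1))
          (List.range' 1 (tail.length - (tail.takeWhile notOne).length - 1)) := by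
      apply List.filter_congr
      intro x _
      simp only [Function.comp_apply]
      rw [show x + ((tail.takeWhile notOne).length + 1) = ((tail.takeWhile notOne).length + 1) + x from by omega,
          ← getD_drop']
    have hst : startsTail (p :: tail) ((p :: tail).length)
        = ((tail.takeWhile notOne).length + 1)
            :: (startsTail ((p :: tail).drop ((tail.takeWhile notOne).length + 1))
                  (tail.length - (tail.takeWhile notOne).length)).map (· + ((tail.takeWhile notOne).length + 1)) := by
      unfold startsTail
      simp only [List.length_cons, Nat.add_sub_cancel]
      have hsplit : List.range' 1 tail.length
          = List.range' 1 (tail.takeWhile notOne).length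
            ++ List.range' ((tail.takeWhile notOne).length + 1)
                ((tail.length - (tail.takeWhile notOne).length - 1) + 1) := by
        have h := @List.range'_append 1 (tail.takeWhile notOne).length
          ((tail.length - (tail.takeWhile notOne).length - 1) + 1) 1
        simp only [one_mul] at h
        rw [show 1 + (tail.takeWhile notOne).length = (tail.takeWhile notOne).length + 1 from by omega,
            show (tail.takeWhile notOne).length + ((tail.length - (tail.takeWhile notOne).length - 1) + 1) = tail.length from by omega] at h
        exact h.symm
      rw [hsplit, List.filter_append, List.filter_eq_nil_iff.mpr hlowF, List.nil_append]
      rw [List.range'_succ]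
      rw [List.filter_cons_of_pos (by rw [hdget, hqget]; exact hq1)]
      congr 1
      rw [show (tail.takeWhile notOne).length + 1 + 1 = 1 + ((tail.takeWhile notOne).length + 1) from by omega,
          range'_shift, List.filter_map, hfil]
    rw [hst]
    unfold chop
    rw [List.cons_append, List.zip_cons_cons, List.map_cons]
    have hfst : sliceF ((p :: tail).map Prod.fst) (0, (tail.takeWhile notOne).length + 1)
        = p.1 :: (tail.takeWhile notOne).map Prod.fst := by
      unfold sliceF
      simp only [List.drop_zero, Nat.sub_zero, List.map_cons, List.take_succ_cons]
      rw [← List.map_take]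
      congr 1
      rw [← takeWhile_eq_take]
    rw [hfst]
    have hrest :
        ((((tail.takeWhile notOne).length + 1) :: (startsTail ((p :: tail).drop ((tail.takeWhile notOne).length + 1)) (tail.length - (tail.takeWhile notOne).length)).map (· + ((tail.takeWhile notOne).length + 1))).zip
            ((startsTail ((p :: tail).drop ((tail.takeWhile notOne).length + 1)) (tail.length - (tail.takeWhile notOne).length)).map (· + ((tail.takeWhile notOne).length + 1)) ++ [(p :: tail).length])).map
          (sliceF ((p :: tail).map Prod.fst))
        = chop (((p :: tail).drop ((tail.takeWhile notOne).length + 1)).map Prod.fst)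
            (startsTail ((p :: tail).drop ((tail.takeWhile notOne).length + 1)) (tail.length - (tail.takeWhile notOne).length))
            (tail.length - (tail.takeWhile notOne).length) := by
      have h1 : ((tail.takeWhile notOne).length + 1)
            :: (startsTail ((p :: tail).drop ((tail.takeWhile notOne).length + 1)) (tail.length - (tail.takeWhile notOne).length)).map (· + ((tail.takeWhile notOne).length + 1))
          = (0 :: startsTail ((p :: tail).drop ((tail.takeWhile notOne).length + 1)) (tail.length - (tail.takeWhile notOne).length)).map (· + ((tail.takeWhile notOne).length + 1)) := by
        simp
      have h2 : (startsTail ((p :: tail).drop ((tail.takeWhile notOne).length + 1)) (tail.length - (tail.takeWhile notOne).length)).map (· + ((tail.takeWhile notOne).length + 1)) ++ [(p :: tail).length]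
          = ((startsTail ((p :: tail).drop ((tail.takeWhile notOne).length + 1)) (tail.length - (tail.takeWhile notOne).length))
              ++ [tail.length - (tail.takeWhile notOne).length]).map (· + ((tail.takeWhile notOne).length + 1)) := by
        rw [List.map_append]
        simp only [List.map_cons, List.map_nil, List.length_cons]
        rw [show tail.length - (tail.takeWhile notOne).length + ((tail.takeWhile notOne).length + 1) = tail.length + 1 from by omega]
      rw [h1, h2, List.zip_map, List.map_map]
      unfold chop
      apply List.map_congr_left
      intro se _
      obtain ⟨s, e⟩ := se
      simp only [Function.comp_apply, Prod.map]
      unfold sliceF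
      rw [show e + ((tail.takeWhile notOne).length + 1) - (s + ((tail.takeWhile notOne).length + 1)) = e - s from by omega]
      rw [show s + ((tail.takeWhile notOne).length + 1) = ((tail.takeWhile notOne).length + 1) + s from by omega,
          ← List.drop_drop, List.map_drop]
    rw [hrest]
    have hrec := IH ((p :: tail).drop ((tail.takeWhile notOne).length + 1)).length
      (by simp only [List.length_drop, List.length_cons]; omega)
      ((p :: tail).drop ((tail.takeWhile notOne).length + 1)) rfl hne'
    rw [hlen'] at hrec
    rw [hrec]
    conv_rhs => rw [segWords_cons]
    rw [hstep]

-- A-side: the fold computes the word recursion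
theorem segA_aux (ps : List (Char × Int)) : ∀ (words : List String) (cur : List Char), cur ≠ [] →
    segFin (ps.foldl segStep (words, cur)) =
      words ++ (((cur ++ (ps.takeWhile notOne).map Prod.fst) :: segWords (ps.dropWhile notOne)).map wordify) := by
  induction ps with
  | nil =>
    intro words cur hc
    simp [segFin, wordify, hc, segWords_nil]
  | cons p ps ih =>
    intro words cur hc
    by_cases h1 : p.2 = 1
    · have hs : segStep (words, cur) p = (words ++ [wordify cur], [p.1]) := by
        simp [segStep, h1, hc, wordify]
      rw [List.foldl_cons, hs, ih _ _ (by simp)]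
      rw [List.takeWhile_cons_of_neg (by simp [notOne, h1]),
          List.dropWhile_cons_of_neg (by simp [notOne, h1])]
      rw [segWords_cons]
      simp
    · have hs : segStep (words, cur) p = (words, cur ++ [p.1]) := by
        simp [segStep, h1]
      rw [List.foldl_cons, hs, ih _ _ (by simp)]
      rw [List.takeWhile_cons_of_pos (by simp [notOne, h1]),
          List.dropWhile_cons_of_pos (by simp [notOne, h1])]
      simp

theorem segA_eq (text : String) (labels : List Int) :
    segment_text text labels = (segWords (text.toList.zip labels)).map wordify := by
  unfold segment_text
  cases hz : text.toList.zip labels with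
  | nil => simp [segFin, segWords_nil]
  | cons p ps =>
    have hs : segStep ([], []) p = ([], [p.1]) := by
      by_cases h1 : p.2 = 1 <;> simp [segStep, h1]
    rw [List.foldl_cons, hs, segA_aux ps [] [p.1] (by simp)]
    rw [segWords_cons]
    simp

-- members of startsTail are at most n
theorem startsTail_le (ps : List (Char × Int)) (n : Nat) :
    ∀ b ∈ startsTail ps n, b ≤ n := by
  intro b hb
  unfold startsTail at hb
  have := List.mem_filter.mp hb
  rw [List.mem_range'_1] at this
  omega

-- B-side: the port computes the word recursion
theorem segB_eq (text : String) (labels : List Int) :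
    segment_text_alt text labels = (segWords (text.toList.zip labels)).map wordify := by
  have hlen := @List.length_zip _ _ text.toList labels
  by_cases hn : (text.toList.zip labels).length = 0
  · have hz : text.toList.zip labels = [] := List.eq_nil_of_length_eq_zero hn
    have hc : min (PySem.Str.len text) ((labels.length : Int)) = 0 := by
      rw [PySem.Str.len_eq]
      omega
    simp only [segment_text_alt]
    rw [hc, if_pos rfl, hz, segWords_nil]
    rfl
  · have hc : min (PySem.Str.len text) ((labels.length : Int)) = ((text.toList.zip labels).length : Int) := by
      rw [PySem.Str.len_eq, List.length_zip]
      exact (Nat.cast_min _ _).symm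
    simp only [segment_text_alt]
    rw [hc, if_neg (by omega)]
    have hstarts : (PySem.List.pyRange 1 ((text.toList.zip labels).length : Int) 1).filter
          (fun i => PySem.List.pyGetD labels i 0 == 1)
        = (startsTail (text.toList.zip labels) (text.toList.zip labels).length).map (fun k : Nat => (k : Int)) := by
      rw [PySem.List.pyRange_one, List.filter_map]
      unfold startsTail
      rw [List.range'_eq_map_range, List.filter_map, List.map_map]
      rw [show (((text.toList.zip labels).length : Int) - 1).toNat = (text.toList.zip labels).length - 1 from by omega]
      have hfil : List.filter ((fun i => PySem.List.pyGetD labels i 0 == 1) ∘ fun k : Nat => (1 : Int) + (k : Int))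
            (List.range ((text.toList.zip labels).length - 1))
          = List.filter ((fun i => ((text.toList.zip labels).getD i (' ', (0:Int))).2 == 1) ∘ (fun x => 1 + x))
            (List.range ((text.toList.zip labels).length - 1)) := by
        apply List.filter_congr
        intro x hx
        rw [List.mem_range] at hx
        simp only [Function.comp_apply]
        rw [show (1 : Int) + (x : Int) = ((1 + x : Nat) : Int) from by push_cast; ring,
            PySem.List.pyGetD_natCast, snd_getD_zip _ _ _ (by omega)]
      rw [hfil]
      apply List.map_congr_left
      intro x _
      simp only [Function.comp_apply]
      push_cast
      ring
    rw [hstarts]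
    rw [show ([(0:Int)] ++ (startsTail (text.toList.zip labels) (text.toList.zip labels).length).map (fun k : Nat => (k : Int)))
          = ((0 :: startsTail (text.toList.zip labels) (text.toList.zip labels).length).map (fun k : Nat => (k : Int))) from by simp]
    rw [PySem.List.slice_from_one]
    rw [show ((0 :: startsTail (text.toList.zip labels) (text.toList.zip labels).length).map (fun k : Nat => (k : Int))).tail
          = (startsTail (text.toList.zip labels) (text.toList.zip labels).length).map (fun k : Nat => (k : Int)) from by simp]
    rw [show (startsTail (text.toList.zip labels) (text.toList.zip labels).length).map (fun k : Nat => (k : Int)) ++ [((text.toList.zip labels).length : Int)]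
          = ((startsTail (text.toList.zip labels) (text.toList.zip labels).length) ++ [(text.toList.zip labels).length]).map (fun k : Nat => (k : Int)) from by simp]
    rw [List.zip_map, List.map_map]
    have hbound : ∀ se ∈ (0 :: startsTail (text.toList.zip labels) (text.toList.zip labels).length).zip
          ((startsTail (text.toList.zip labels) (text.toList.zip labels).length) ++ [(text.toList.zip labels).length]),
        se.2 ≤ (text.toList.zip labels).length := by
      intro se hse
      rcases List.of_mem_zip hse with ⟨-, h2⟩
      rcases List.mem_append.mp h2 with h2 | h2
      · exact startsTail_le _ _ _ h2
      · rw [List.mem_singleton] at h2; omega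
    rw [← chop_eq_segWords (text.toList.zip labels).length (text.toList.zip labels) rfl
        (by intro h; exact hn (by rw [h]; rfl))]
    unfold chop
    rw [List.map_map]
    apply List.map_congr_left
    intro se hse
    obtain ⟨s, e⟩ := se
    simp only [Function.comp_apply, Prod.map]
    rw [lower_slice]
    unfold sliceF
    rw [map_fst_zip_eq_take, slice_take _ _ _ _ (hbound (s, e) hse)]

-- ===== VERDICT (by name: the statement is the Claim_ definition above) =====
theorem segment_text_spec : Claim_equal_segment_text := by
  intro text labels _
  unfold Spec_segment_text
  rw [segA_eq, segB_eq]
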